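-- pv_equiv track=rewrite | github.com/rana-taqveem/python-learning | udemy/functions.py | count_love_chars
-- ===== SOURCE A (Python) =====
-- def count_love_chars(nameChars):
--
--     num_of_Ls = 0
--     num_of_Os = 0
--     num_of_Vs = 0
--     num_of_Es = 0
--
--     for char in nameChars:
--         if char == 'l':
--             num_of_Ls = num_of_Ls + 1
--         elif char == 'o':
--             num_of_Os = num_of_Os + 1
--         elif char == 'v':
--             num_of_Vs = num_of_Vs + 1
--         elif char == 'e':
--             num_of_Es = num_of_Es + 1
--
--     return num_of_Ls, num_of_Os, num_of_Vs, num_of_Es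
-- ===== SOURCE B (Python) =====
-- def count_love_chars(nameChars):
--     def tally(ch):
--         return sum(1 for c in nameChars if c == ch)
--     return tally('l'), tally('o'), tally('v'), tally('e')
-- ===== Notes on version B (the rewrite author's own statement) =====
-- stated objective: simpler
-- what changed: Replaced the single pass with four mutable accumulators and an if/elif chain by four independent per-letter tally passes, each a direct sum over the characters equal to that letter.
import Mathlib
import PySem

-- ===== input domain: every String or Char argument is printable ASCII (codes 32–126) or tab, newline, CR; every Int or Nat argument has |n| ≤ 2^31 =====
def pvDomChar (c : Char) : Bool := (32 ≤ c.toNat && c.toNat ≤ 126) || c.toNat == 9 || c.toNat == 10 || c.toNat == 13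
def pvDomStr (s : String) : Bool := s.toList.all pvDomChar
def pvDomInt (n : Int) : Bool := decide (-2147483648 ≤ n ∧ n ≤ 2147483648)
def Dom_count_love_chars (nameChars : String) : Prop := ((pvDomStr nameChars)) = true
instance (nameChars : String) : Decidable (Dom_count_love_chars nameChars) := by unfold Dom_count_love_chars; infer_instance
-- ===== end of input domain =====

-- B replaces A's single pass over four mutable accumulators with four independent per-letter tally passes (simpler decomposition, same cost).

-- ===== PORT A =====
-- loop body of A's for-loop (the if/elif chain over the four accumulators)
def lcStep (acc : Int × Int × Int × Int) (char : Char) : Int × Int × Int × Int :=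
  let (l, o, v, e) := acc
  if char == 'l' then (l + 1, o, v, e)
  else if char == 'o' then (l, o + 1, v, e)
  else if char == 'v' then (l, o, v + 1, e)
  else if char == 'e' then (l, o, v, e + 1)
  else (l, o, v, e)

def count_love_chars (nameChars : String) : Int × Int × Int × Int :=
  nameChars.toList.foldl lcStep (0, 0, 0, 0)

-- ===== PORT B =====
-- Source B's tally(ch): sum(1 for c in nameChars if c == ch)
def lcTally (nameChars : String) (ch : Char) : Int :=
  (nameChars.toList.map (fun c => if c == ch then (1 : Int) else 0)).sum

def count_love_chars_alt (nameChars : String) : Int × Int × Int × Int :=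
  (lcTally nameChars 'l', lcTally nameChars 'o', lcTally nameChars 'v', lcTally nameChars 'e')

-- ===== PRECONDITION & SPEC =====
def Spec_count_love_chars (nameChars : String) (out : Int × Int × Int × Int) : Prop := out = count_love_chars_alt nameChars
instance (nameChars : String) (out : Int × Int × Int × Int) : Decidable (Spec_count_love_chars nameChars out) := by unfold Spec_count_love_chars; infer_instance

-- ===== CLAIM (what is proved, stated in full; the proofs are below) =====
def Claim_equal_count_love_chars : Prop := ∀ (nameChars : String), Dom_count_love_chars nameChars → Spec_count_love_chars nameChars (count_love_chars nameChars)

-- ===== LEMMAS AND PROOFS =====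
theorem count_love_chars_loop (xs : List Char) (l o v e : Int) :
    xs.foldl lcStep (l, o, v, e)
      = (l + xs.count 'l', o + xs.count 'o', v + xs.count 'v', e + xs.count 'e') := by
  induction xs generalizing l o v e with
  | nil => simp
  | cons c t ih =>
    rw [List.foldl_cons]
    by_cases hl : c = 'l'
    · subst hl
      rw [show lcStep (l, o, v, e) 'l' = (l + 1, o, v, e) from rfl, ih]
      simp; ring
    · by_cases ho : c = 'o'
      · subst ho
        rw [show lcStep (l, o, v, e) 'o' = (l, o + 1, v, e) from rfl, ih]
        simp [hl]; ring
      · by_cases hv : c = 'v'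
        · subst hv
          rw [show lcStep (l, o, v, e) 'v' = (l, o, v + 1, e) from rfl, ih]
          simp [hl, ho]; ring
        · by_cases he : c = 'e'
          · subst he
            rw [show lcStep (l, o, v, e) 'e' = (l, o, v, e + 1) from rfl, ih]
            simp [hl, ho, hv]; ring
          · rw [show lcStep (l, o, v, e) c = (l, o, v, e) by
              simp [lcStep, hl, ho, hv, he], ih]
            simp [hl, ho, hv, he]

theorem sum_ite_eq_count (xs : List Char) (ch : Char) :
    (xs.map (fun c => if c == ch then (1 : Int) else 0)).sum = (xs.count ch : Int) := by
  induction xs with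
  | nil => simp
  | cons c t ih =>
    simp only [List.map_cons, List.sum_cons, List.count_cons, beq_iff_eq] at *
    by_cases h : c = ch <;> simp [h, ih] <;> omega

theorem lcTally_eq_count (s : String) (ch : Char) :
    lcTally s ch = (s.toList.count ch : Int) := sum_ite_eq_count s.toList ch

-- ===== VERDICT (by name: the statement is the Claim_ definition above) =====
theorem count_love_chars_spec : Claim_equal_count_love_chars := by
  intro s _
  unfold Spec_count_love_chars count_love_chars count_love_chars_alt
  rw [count_love_chars_loop]
  simp [lcTally_eq_count]
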